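-- pv_equiv track=rewrite | github.com/umbum/Algorithm | kakao_blind2018/3.can_key.py | getCombinationSets
-- ===== SOURCE A (Python) =====
-- def getCombinationSets(relation):
--     """
--     조합을 만들 때, bit를 이용해서 만들 수 있다.
--     A(1), B(10), BA(11), C(100), CA(101), ... 이런 식으로
--     """
--     answer_list = list()
--     for i in range(1, 1 << len(relation[0])):    # 조합을 의미. 총 조합의 수 만큼 돌아야 하니 nC1 + nC2 + ... nCn = (2^n)-1 만큼 돈다.
--         tmp_set = set()
--         for j in range(len(relation)):           # 한 row씩 꺼낸다.
--             tmp = ''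
--             for k in range(len(relation[0])):    # 조합에 해당하는 col들을 선택하는 역할.
--                 if i & (1 << k):
--                     tmp += str(relation[j][k])
--             tmp_set.add(tmp)
--         yield tmp_set, i
-- ===== SOURCE B (Python) =====
-- def getCombinationSets(relation):
--     # Subset DP: build each mask's per-row strings from the mask with its
--     # highest column removed (one concatenation per row instead of a scan
--     # over all columns), then yield the set of that row-list.
--     n = len(relation[0])
--     dp = [[''] * len(relation)]
--     for i in range(1, 1 << n):
--         hi = i.bit_length() - 1
--         prev = dp[i ^ (1 << hi)]
--         cur = [p + str(row[hi]) for row, p in zip(relation, prev)]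
--         dp.append(cur)
--         yield set(cur), i
-- ===== Notes on version B (the rewrite author's own statement) =====
-- stated objective: faster
-- what changed: Replaces A's per-mask rescan of all n columns for every row by a subset DP over masks: each mask's per-row strings are built with one concatenation from the mask with its highest column bit removed.
import Mathlib
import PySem

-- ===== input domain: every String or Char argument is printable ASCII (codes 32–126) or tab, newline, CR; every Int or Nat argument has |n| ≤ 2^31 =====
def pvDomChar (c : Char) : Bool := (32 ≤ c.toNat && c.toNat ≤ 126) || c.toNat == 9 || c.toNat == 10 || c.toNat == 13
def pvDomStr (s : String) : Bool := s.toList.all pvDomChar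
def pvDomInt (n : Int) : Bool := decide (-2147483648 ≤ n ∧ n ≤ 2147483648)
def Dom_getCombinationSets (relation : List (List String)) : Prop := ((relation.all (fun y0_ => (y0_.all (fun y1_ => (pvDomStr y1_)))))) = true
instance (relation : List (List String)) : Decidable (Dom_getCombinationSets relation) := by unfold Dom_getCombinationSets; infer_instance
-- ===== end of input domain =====

-- B replaces A's per-mask rescan of all columns by a subset DP over bit masks
-- (one concatenation per row per mask, extending the mask without its highest bit);
-- a timing run measured B faster by a constant factor.

-- ===== PORT A =====
-- inner loop of A: tmp = ''; for k in range(n): if i & (1 << k): tmp += str(relation[j][k])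
-- (indexing via pyGetD: in range under Pre_, where Python does not raise)
def pvARow (i n : Nat) (row : List String) : String :=
  (List.range n).foldl
    (fun tmp k => if i &&& (1 <<< k) != 0 then tmp ++ PySem.List.pyGetD row (k : Int) "" else tmp) ""

def getCombinationSets (relation : List (List String)) : List (List String × Int) :=
  (PySem.List.pyRange 1 ((1 : Int) <<< (PySem.List.pyGetD relation 0 []).length) 1).map (fun i =>
    (relation.foldl
      (fun s row => PySem.Set.add s (pvARow i.toNat (PySem.List.pyGetD relation 0 []).length row))
      PySem.Set.empty, i))

-- ===== PORT B =====
-- loop body of B: hi = i.bit_length()-1; prev = dp[i ^ (1 << hi)];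
-- cur = [p + str(row[hi]) for row, p in zip(relation, prev)]; dp.append(cur); yield set(cur), i
def pvStep (relation : List (List String))
    (st : List (List String) × List (List String × Int)) (i : Int) :
    List (List String) × List (List String × Int) :=
  let hi := PySem.Int.bitLength i - 1
  let prev := PySem.List.pyGetD st.1 (PySem.Int.bxor i ((1 : Int) <<< hi)) []
  let cur := (relation.zip prev).map (fun rp => rp.2 ++ PySem.List.pyGetD rp.1 (hi : Int) "")
  (st.1 ++ [cur], st.2 ++ [(PySem.Set.ofList cur, i)])

def getCombinationSets_alt (relation : List (List String)) : List (List String × Int) :=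
  ((PySem.List.pyRange 1 ((1 : Int) <<< (PySem.List.pyGetD relation 0 []).length) 1).foldl
    (pvStep relation) ([List.replicate relation.length ""], [])).2

-- ===== PRECONDITION & SPEC =====
-- Pre_ excludes exactly the inputs where Python A raises IndexError: an empty
-- relation (relation[0]) and rows shorter than the first row (relation[j][k]).
def Pre_getCombinationSets (relation : List (List String)) : Prop :=
  relation ≠ [] ∧ ∀ row ∈ relation, (relation.headD []).length ≤ row.length
instance (relation : List (List String)) : Decidable (Pre_getCombinationSets relation) := by
  unfold Pre_getCombinationSets; infer_instance

def pvWitness_getCombinationSets : List (List String) := [["a", "b"], ["c", "d"]]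

def Spec_getCombinationSets (relation : List (List String)) (out : List (List String × Int)) : Prop := out = getCombinationSets_alt relation
instance (relation : List (List String)) (out : List (List String × Int)) : Decidable (Spec_getCombinationSets relation out) := by unfold Spec_getCombinationSets; infer_instance

-- ===== CLAIM (what is proved, stated in full; the proofs are below) =====
def Claim_equal_getCombinationSets : Prop := ∀ (relation : List (List String)), Dom_getCombinationSets relation → Pre_getCombinationSets relation → Spec_getCombinationSets relation (getCombinationSets relation)

-- ===== LEMMAS AND PROOFS =====

-- per-mask per-row strings A produces
def pvMSpec (relation : List (List String)) (n m : Nat) : List String :=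
  relation.map (fun row => pvARow m n row)

theorem pvAnd_shift (i k : Nat) : (i &&& (1 <<< k) != 0) = i.testBit k := by
  cases h : i.testBit k <;> simp [Nat.one_shiftLeft, Nat.and_two_pow, h]

theorem pvFoldl_if (p : Nat → Bool) (f : Nat → String) :
    ∀ (l : List Nat) (acc : String),
      l.foldl (fun a k => if p k then a ++ f k else a) acc
        = (l.filter p).foldl (fun a k => a ++ f k) acc := by
  intro l
  induction l with
  | nil => intro acc; rfl
  | cons x xs ih =>
    intro acc
    by_cases h : p x = true <;> simp [h, ih]

theorem pvTestBit_xor_ne (i L k : Nat) (h : L ≠ k) :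
    (i ^^^ 2 ^ L).testBit k = i.testBit k := by
  rw [Nat.testBit_xor, Nat.testBit_two_pow]
  simp [h]

theorem pvFilter_split (i L : Nat) (hL : i.testBit L = true)
    (hhi : ∀ k, L < k → i.testBit k = false) :
    ∀ n, L < n →
      (List.range n).filter (fun k => i.testBit k)
        = (List.range n).filter (fun k => (i ^^^ 2 ^ L).testBit k) ++ [L] := by
  intro n
  induction n with
  | zero => omega
  | succ m ih =>
    intro hmn
    by_cases hm : L < m
    · rw [List.range_succ, List.filter_append, List.filter_append, ih hm]
      have h1 : i.testBit m = false := hhi m hm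
      simp [h1, Nat.testBit_two_pow]
      omega
    · have hLm : L = m := by omega
      subst hLm
      rw [List.range_succ, List.filter_append, List.filter_append]
      have hcongr : (List.range L).filter (fun k => i.testBit k)
          = (List.range L).filter (fun k => (i ^^^ 2 ^ L).testBit k) := by
        apply List.filter_congr
        intro k hk
        rw [pvTestBit_xor_ne i L k (by simp [List.mem_range] at hk; omega)]
      simp [hL, hcongr, Nat.testBit_two_pow]

theorem pvTestBit_log2 (i : Nat) (hpos : 0 < i) : i.testBit (Nat.log2 i) = true := by
  have hlow : 2 ^ Nat.log2 i ≤ i := Nat.log2_self_le hpos.ne'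
  have hhigh : i < 2 ^ (Nat.log2 i + 1) := Nat.lt_log2_self
  rw [Nat.testBit_eq_decide_div_mod_eq]
  have hd : i / 2 ^ Nat.log2 i = 1 :=
    Nat.div_eq_of_lt_le (by simpa using hlow) (by rw [pow_succ] at hhigh; omega)
  simp [hd]

theorem pvRow_split (i n : Nat) (hpos : 0 < i) (hin : i < 2 ^ n) (row : List String) :
    pvARow i n row
      = pvARow (i ^^^ 2 ^ Nat.log2 i) n row ++ row.getD (Nat.log2 i) "" := by
  have hne : i ≠ 0 := hpos.ne'
  set L := Nat.log2 i with hLdef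
  have hL : i.testBit L = true := pvTestBit_log2 i hpos
  have hhigh : i < 2 ^ (L + 1) := Nat.lt_log2_self
  have hhi : ∀ k, L < k → i.testBit k = false := by
    intro k hk
    exact Nat.testBit_lt_two_pow (lt_of_lt_of_le hhigh (Nat.pow_le_pow_right (by norm_num) hk))
  have hn : L < n := (Nat.log2_lt hne).mpr hin
  simp only [pvARow, PySem.List.pyGetD_natCast, pvAnd_shift]
  rw [pvFoldl_if, pvFoldl_if, pvFilter_split i L hL hhi n hn, List.foldl_append]
  rfl

theorem pvARow_zero (n : Nat) (row : List String) : pvARow 0 n row = "" := by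
  simp [pvARow]

theorem pvBitLen (m : Nat) (hm : 0 < m) :
    PySem.Int.bitLength (m : Int) - 1 = Nat.log2 m := by
  have hne : (m : Int) ≠ 0 := by exact_mod_cast hm.ne'
  have h1 := PySem.Int.lt_two_pow_bitLength (m : Int)
  have h2 := PySem.Int.two_pow_bitLength_le (m : Int) hne
  rw [Int.natAbs_natCast] at h1 h2
  have hbl : PySem.Int.bitLength (m : Int) ≠ 0 := by
    intro h; rw [h] at h1; omega
  have hle : PySem.Int.bitLength (m : Int) - 1 ≤ Nat.log2 m :=
    (Nat.le_log2 hm.ne').mpr h2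
  have hlt : Nat.log2 m < PySem.Int.bitLength (m : Int) :=
    (Nat.log2_lt hm.ne').mpr h1
  omega

theorem pvZipSelf {α : Type} (xs : List α) : xs.zip xs = xs.map (fun x => (x, x)) := by
  induction xs with
  | nil => rfl
  | cons x l ih => simp [List.zip_cons_cons, ih]

theorem pvXor_lt (m L : Nat) (hL : m.testBit L = true) : m ^^^ 2 ^ L < m := by
  apply Nat.lt_of_testBit L
  · rw [Nat.testBit_xor, hL, Nat.testBit_two_pow]; simp
  · exact hL
  · intro j hj
    rw [pvTestBit_xor_ne m L j (by omega)]

theorem pvMain (relation : List (List String)) (n : Nat) :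
    ∀ c : Nat, c < 2 ^ n →
      ((List.range c).map (fun k : Nat => (1 : Int) + k)).foldl
        (pvStep relation) ([List.replicate relation.length ""], [])
      = ((List.range (c + 1)).map (pvMSpec relation n),
         (List.range c).map (fun t : Nat => (PySem.Set.ofList (pvMSpec relation n (t + 1)), (1 : Int) + t))) := by
  intro c
  induction c with
  | zero =>
    intro _
    simp [pvMSpec, pvARow_zero, List.map_const']
  | succ c ih =>
    intro hc
    rw [List.range_succ, List.map_append, List.foldl_append, ih (by omega)]
    simp only [List.map_cons, List.map_nil, List.foldl_cons, List.foldl_nil, pvStep]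
    have hcast : ((1 : Int) + (c : Int)) = ((c + 1 : Nat) : Int) := by push_cast; ring
    set L := Nat.log2 (c + 1) with hLdef
    have hbl : PySem.Int.bitLength ((1 : Int) + c) - 1 = L := by
      rw [hcast]; exact pvBitLen (c + 1) (by omega)
    rw [hbl]
    have hshift : ((1 : Int) <<< L) = ((2 ^ L : Nat) : Int) := by
      rw [Int.shiftLeft_eq]; push_cast; ring
    have hLbit : (c + 1).testBit L = true := pvTestBit_log2 (c + 1) (by omega)
    have hjlt : (c + 1) ^^^ 2 ^ L < c + 1 := pvXor_lt (c + 1) L hLbit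
    have hprev : PySem.List.pyGetD ((List.range (c + 1)).map (pvMSpec relation n))
        (PySem.Int.bxor ((1 : Int) + c) ((1 : Int) <<< L)) []
        = pvMSpec relation n ((c + 1) ^^^ 2 ^ L) := by
      rw [hcast, hshift, PySem.Int.bxor_natCast, PySem.List.pyGetD_natCast]
      exact PySem.List.getD_map_range _ _ _ _ (by omega)
    rw [hprev]
    have hcur : (relation.zip (pvMSpec relation n ((c + 1) ^^^ 2 ^ L))).map
          (fun rp => rp.2 ++ PySem.List.pyGetD rp.1 (L : Int) "")
        = pvMSpec relation n (c + 1) := by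
      rw [pvMSpec, List.zip_map_right, pvZipSelf, List.map_map, List.map_map, pvMSpec]
      apply List.map_congr_left
      intro row _
      simp only [Function.comp, Prod.map, id]
      rw [PySem.List.pyGetD_natCast]
      exact (pvRow_split (c + 1) n (by omega) hc row).symm
    rw [hcur]
    simp [List.range_succ]

theorem pvSetFold (relation : List (List String)) (f : List String → String) :
    relation.foldl (fun s row => PySem.Set.add s (f row)) PySem.Set.empty
      = PySem.Set.ofList (relation.map f) := by
  rw [PySem.Set.ofList_eq_foldl, List.foldl_map]; rfl

theorem pvTwoPowInt (n : Nat) : (((1 : Int) <<< n) - 1).toNat = 2 ^ n - 1 := by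
  rw [Int.shiftLeft_eq, one_mul]
  have h : ((2 : Int) ^ n) = ((2 ^ n : Nat) : Int) := by push_cast; rfl
  rw [h]
  omega

-- ===== VERDICT (by name: the statement is the Claim_ definition above) =====
theorem getCombinationSets_spec : Claim_equal_getCombinationSets := by
  intro relation _ _
  simp only [Spec_getCombinationSets, getCombinationSets, getCombinationSets_alt]
  generalize (PySem.List.pyGetD relation 0 []).length = n
  rw [PySem.List.pyRange_one, pvTwoPowInt]
  rw [pvMain relation n (2 ^ n - 1)
    (by have := Nat.two_pow_pos n; omega)]
  rw [List.map_map]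
  apply List.map_congr_left
  intro k hk
  simp only [Function.comp]
  rw [pvSetFold]
  have hto : ((1 : Int) + (k : Int)).toNat = k + 1 := by omega
  rw [hto]
  rfl
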